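-- pv_equiv track=rewrite | github.com/andrewandante/aoc-2023 | day12/exec.py | get_arrangement
-- ===== SOURCE A (Python) =====
-- def get_arrangement(status_line, target):
--     in_damaged = False
--     damaged_count = 0
--     arrangement = []
--     for character in status_line:
--         if character == '#':
--             if in_damaged == False:
--                 in_damaged = True
--             damaged_count = damaged_count + 1
--         else:
--             if damaged_count > 0:
--                 arrangement.append(damaged_count)
--                 if arrangement != target[0:len(arrangement)]:
--                     return False
--             in_damaged = False
--             damaged_count = 0
--     if in_damaged == True:
--         arrangement.append(damaged_count)
--     return arrangement == target
-- ===== SOURCE B (Python) =====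
-- def get_arrangement(status_line, target):
--     # Staged computation: a two-pointer index scan extracts the complete
--     # run-length encoding of '#' groups first, then one final comparison
--     # against target replaces A's per-group prefix re-comparisons.
--     s = status_line
--     n = len(s)
--     runs = []
--     i = 0
--     while i < n:
--         if s[i] == '#':
--             j = i
--             while j < n and s[j] == '#':
--                 j += 1
--             runs.append(j - i)
--             i = j
--         else:
--             i += 1
--     return runs == target
-- ===== Notes on version B (the rewrite author's own statement) =====
-- stated objective: alternative
-- what changed: B is a staged computation: a two-pointer index scan first extracts the complete run-length encoding of '#' groups, then ONE final list comparison replaces A's character state machine with per-group prefix re-slicing and early exits.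
import Mathlib
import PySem

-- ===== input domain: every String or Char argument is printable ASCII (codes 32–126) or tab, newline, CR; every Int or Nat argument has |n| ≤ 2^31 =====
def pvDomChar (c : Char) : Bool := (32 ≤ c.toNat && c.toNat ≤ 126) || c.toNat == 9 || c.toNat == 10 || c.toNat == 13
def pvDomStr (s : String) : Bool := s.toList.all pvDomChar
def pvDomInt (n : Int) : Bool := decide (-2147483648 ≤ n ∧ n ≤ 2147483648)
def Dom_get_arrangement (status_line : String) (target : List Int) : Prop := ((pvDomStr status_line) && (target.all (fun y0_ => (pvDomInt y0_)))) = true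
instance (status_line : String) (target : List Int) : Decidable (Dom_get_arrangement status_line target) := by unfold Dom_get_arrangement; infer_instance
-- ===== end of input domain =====

-- B stages the work (two-pointer scan extracting the full run-length encoding, then one final comparison) instead of A's per-character state machine with prefix re-slicing; same cost class, alternative structure.

-- ===== PORT A =====
-- state: (in_damaged, damaged_count, arrangement); `none` = the early `return False`
def getArrStepA (target : List Int) (st : Bool × Int × List Int) (c : Char) :
    Option (Bool × Int × List Int) :=
  if c = '#' then
    -- `if in_damaged == False: in_damaged = True` just sets it to true
    some (true, st.2.1 + 1, st.2.2)
  else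
    if st.2.1 > 0 then
      let arr := st.2.2 ++ [st.2.1]
      if arr ≠ PySem.List.slice target (some 0) (some (arr.length : Int)) then none
      else some (false, 0, arr)
    else some (false, 0, st.2.2)

def get_arrangement (status_line : String) (target : List Int) : Bool :=
  match status_line.toList.foldlM (getArrStepA target) (false, 0, []) with
  | none => false
  | some (in_damaged, damaged_count, arrangement) =>
    let arrangement := if in_damaged then arrangement ++ [damaged_count] else arrangement
    arrangement == target

-- ===== PORT B =====
-- inner `while j < n and s[j] == '#': j += 1` (guard ensures the index is in range, so getD is exact)
def skipHash (s : List Char) (n : Nat) (j : Nat) : Nat :=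
  if h : j < n ∧ s.getD j ' ' = '#' then skipHash s n (j + 1) else j
termination_by n - j
decreasing_by omega

-- termination helper for the outer loop: the inner while moves j strictly past i
theorem skipHash_ge (s : List Char) (n : Nat) : ∀ j, j ≤ skipHash s n j := by
  intro j
  fun_induction skipHash s n j with
  | case1 j h ih => omega
  | case2 j h => omega

theorem skipHash_gt (s : List Char) (n : Nat) (i : Nat)
    (h : i < n ∧ s.getD i ' ' = '#') : i < skipHash s n i := by
  rw [skipHash, dif_pos h]
  have := skipHash_ge s n (i + 1)
  omega

-- outer `while i < n` building `runs`
def scanRuns (s : List Char) (n : Nat) (i : Nat) (runs : List Int) : List Int :=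
  if h : i < n then
    if hc : s.getD i ' ' = '#' then
      let j := skipHash s n i
      scanRuns s n j (runs ++ [((j - i : Nat) : Int)])
    else
      scanRuns s n (i + 1) runs
  else runs
termination_by n - i
decreasing_by
  · have := skipHash_gt s n i ⟨h, hc⟩; omega
  · omega

def get_arrangement_alt (status_line : String) (target : List Int) : Bool :=
  let s := status_line.toList
  scanRuns s s.length 0 [] == target

-- ===== PRECONDITION & SPEC =====
def Spec_get_arrangement (status_line : String) (target : List Int) (out : Bool) : Prop := out = get_arrangement_alt status_line target
instance (status_line : String) (target : List Int) (out : Bool) : Decidable (Spec_get_arrangement status_line target out) := by unfold Spec_get_arrangement; infer_instance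

-- ===== CLAIM (what is proved, stated in full; the proofs are below) =====
def Claim_equal_get_arrangement : Prop := ∀ (status_line : String) (target : List Int), Dom_get_arrangement status_line target → Spec_get_arrangement status_line target (get_arrangement status_line target)

-- ===== LEMMAS AND PROOFS =====

-- reference run-length encoding with a pending count, the meeting point of both proofs
def runsAux : List Char → Int → List Int
  | [], dc => if dc > 0 then [dc] else []
  | c :: cs, dc =>
    if c = '#' then runsAux cs (dc + 1)
    else if dc > 0 then dc :: runsAux cs 0 else runsAux cs 0

-- wrap A's post-loop computation so the invariant can be stated about arbitrary states
def finishA (target : List Int) (o : Option (Bool × Int × List Int)) : Bool :=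
  match o with
  | none => false
  | some (ind, dc, arr) => (if ind then arr ++ [dc] else arr) == target

lemma slice_prefix (target : List Int) (n : Nat) :
    PySem.List.slice target (some 0) (some ((n : Nat) : Int)) = target.take n := by
  rw [PySem.List.slice_zero_start, PySem.List.slice_to_natCast]

lemma ext_ne_of_not_prefix {target l : List Int} (h : l ≠ target.take l.length) :
    ∀ rest, l ++ rest ≠ target := by
  intro rest he
  apply h
  rw [← he, List.take_left]

lemma invA (target : List Int) (cs : List Char) :
    ∀ (arr : List Int) (dc : Int), 0 ≤ dc → arr = target.take arr.length →
    finishA target (cs.foldlM (getArrStepA target) (decide (0 < dc), dc, arr)) =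
      ((arr ++ runsAux cs dc) == target) := by
  induction cs with
  | nil =>
    intro arr dc _ _
    simp only [List.foldlM, finishA, runsAux]
    by_cases h : 0 < dc <;> simp [h]
  | cons c cs ih =>
    intro arr dc hdc hpref
    simp only [List.foldlM, runsAux]
    by_cases hc : c = '#'
    · have hstep : getArrStepA target (decide (0 < dc), dc, arr) c =
          some (true, dc + 1, arr) := by simp [getArrStepA, hc]
      rw [hstep, if_pos hc]
      have h1 : (true : Bool) = decide (0 < dc + 1) := by simp; omega
      rw [h1]
      exact ih arr (dc + 1) (by omega) hpref
    · rw [if_neg hc]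
      by_cases h : 0 < dc
      · rw [if_pos h]
        have hlen : ((arr ++ [dc]).length : Int) = ((arr.length + 1 : Nat) : Int) := by simp
        by_cases hp : arr ++ [dc] = target.take (arr.length + 1)
        · have hstep : getArrStepA target (decide (0 < dc), dc, arr) c =
              some (false, 0, arr ++ [dc]) := by
            simp only [getArrStepA, if_neg hc, if_pos h]
            rw [hlen, slice_prefix]
            simp [hp]
          rw [hstep]
          have h2 : (false : Bool) = decide ((0:Int) < 0) := by simp
          rw [h2]
          have hpref' : arr ++ [dc] = target.take ((arr ++ [dc]).length) := by
            simpa using hp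
          have := ih (arr ++ [dc]) 0 (le_refl 0) hpref'
          simpa using this
        · have hstep : getArrStepA target (decide (0 < dc), dc, arr) c = none := by
            simp only [getArrStepA, if_neg hc, if_pos h]
            rw [hlen, slice_prefix]
            simp [hp]
          rw [hstep]
          have hne : arr ++ (dc :: runsAux cs 0) ≠ target := by
            have hp' : arr ++ [dc] ≠ target.take ((arr ++ [dc]).length) := by
              simpa using hp
            have := ext_ne_of_not_prefix hp' (runsAux cs 0)
            simpa using this
          simp [finishA, hne]
      · have hdc0 : dc = 0 := by omega
        subst hdc0
        have hstep : getArrStepA target (decide ((0:Int) < 0), 0, arr) c =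
            some (false, 0, arr) := by simp [getArrStepA, hc]
        rw [hstep, if_neg h]
        have h2 : (false : Bool) = decide ((0:Int) < 0) := by rfl
        rw [h2]
        exact ih arr 0 (le_refl 0) hpref

-- the inner while consumes exactly the current run of '#'
lemma skip_runsAux (s : List Char) :
    ∀ i, ∀ c : Int, 0 < c →
      runsAux (s.drop i) c =
        (c + ((skipHash s s.length i - i : Nat) : Int)) :: runsAux (s.drop (skipHash s s.length i)) 0 := by
  intro i
  fun_induction skipHash s s.length i with
  | case1 i h ih =>
    intro c hc
    obtain ⟨hi, hch⟩ := h
    have hdrop : s.drop i = s[i] :: s.drop (i + 1) := List.drop_eq_getElem_cons hi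
    have hgd : s.getD i ' ' = s[i] := by simp [List.getD, hi]
    have hch' : s[i] = '#' := by rw [← hgd]; exact hch
    rw [hdrop, runsAux, if_pos hch']
    have hge := skipHash_ge s s.length (i + 1)
    have := ih (c + 1) (by omega)
    rw [this]
    congr 1
    omega
  | case2 i h =>
    intro c hc
    simp only [Nat.sub_self, Nat.cast_zero, add_zero]
    rcases Nat.lt_or_ge i s.length with hlt | hge
    · have hch : s.getD i ' ' ≠ '#' := by
        intro hch; exact h ⟨hlt, hch⟩
      have hgd : s.getD i ' ' = s[i] := by simp [List.getD, hlt]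
      have hch' : s[i] ≠ '#' := by rw [← hgd]; exact hch
      have hdrop : s.drop i = s[i] :: s.drop (i + 1) := List.drop_eq_getElem_cons hlt
      rw [hdrop, runsAux, if_neg hch', if_pos hc]
      congr 1
      conv_rhs => rw [runsAux]
      rw [if_neg hch']
      simp
    · have : s.drop i = [] := List.drop_eq_nil_of_le hge
      rw [this]
      simp [runsAux, hc]

-- the outer while computes runs ++ RLE of the remaining suffix
lemma invB (s : List Char) (i : Nat) (runs : List Int) :
    scanRuns s s.length i runs = runs ++ runsAux (s.drop i) 0 := by
  fun_induction scanRuns s s.length i runs with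
  | case1 i runs h hc j ih =>
    have hj : j = skipHash s s.length i := rfl
    clear_value j
    subst hj
    have hgt := skipHash_gt s s.length i ⟨h, hc⟩
    have hgd : s.getD i ' ' = s[i] := by simp [List.getD, h]
    have hch' : s[i] = '#' := by rw [← hgd]; exact hc
    have hdrop : s.drop i = s[i] :: s.drop (i + 1) := List.drop_eq_getElem_cons h
    rw [ih, hdrop, runsAux, if_pos hch']
    have hrw := skip_runsAux s (i + 1) 1 (by omega)
    have hsk : skipHash s s.length (i + 1) = skipHash s s.length i := by
      conv_rhs => rw [skipHash]
      rw [dif_pos ⟨h, hc⟩]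
    rw [hsk] at hrw
    simp only [zero_add]
    rw [hrw, List.append_assoc]
    congr 2
    rw [List.singleton_append]
    congr 1
    omega
  | case2 i runs h hc ih =>
    have hlt : i < s.length := h
    have hgd : s.getD i ' ' = s[i] := by simp [List.getD, hlt]
    have hch' : s[i] ≠ '#' := by rw [← hgd]; exact hc
    have hdrop : s.drop i = s[i] :: s.drop (i + 1) := List.drop_eq_getElem_cons hlt
    rw [ih, hdrop, runsAux, if_neg hch']
    simp
  | case3 i runs h =>
    have : s.drop i = [] := List.drop_eq_nil_of_le (by omega)
    rw [this]
    simp [runsAux]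

-- ===== VERDICT (by name: the statement is the Claim_ definition above) =====
theorem get_arrangement_spec : Claim_equal_get_arrangement := by
  intro s target _
  show get_arrangement s target = get_arrangement_alt s target
  have hA := invA target s.toList [] 0 (le_refl 0) (by simp)
  rw [show decide ((0:Int) < 0) = false from rfl] at hA
  have hB := invB s.toList 0 []
  have h1 : get_arrangement s target =
      finishA target (s.toList.foldlM (getArrStepA target) (false, 0, [])) := rfl
  rw [h1, hA]
  have h2 : get_arrangement_alt s target = (scanRuns s.toList s.toList.length 0 [] == target) := rfl
  rw [h2, hB]
  simp
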